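-- pv_equiv track=rewrite | github.com/nbabey20/groundactrec | tools/build_pending_comotion_lists.py | greedy_balance_by_weight
-- ===== SOURCE A (Python) =====
-- def greedy_balance_by_weight(items_with_weights, k: int):
--     """
--     Greedy bin packing by weight (largest-first).
--     items_with_weights: list of (item, weight), weight >= 0
--     Returns: list[b] -> list of (item, weight)
--     """
--     bins_items = [[] for _ in range(k)]
--     bins_w = [0] * k
--     items_with_weights = sorted(items_with_weights, key=lambda x: x[1], reverse=True)
--     for item, w in items_with_weights:
--         bi = min(range(k), key=lambda i: bins_w[i])
--         bins_items[bi].append((item, w))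
--         bins_w[bi] += w
--     return bins_items, bins_w
-- ===== SOURCE B (Python) =====
-- def greedy_balance_by_weight(items_with_weights, k: int):
--     """
--     Same greedy largest-first balancing, but instead of re-scanning all k bin
--     weights per item, maintain the bins as a priority queue: an ascending-sorted
--     list of (weight, bin_index) pairs. Pop the head (lightest bin, lowest index
--     on ties -- exactly Python min's tie-break) and re-insert it at its new
--     sorted position.
--     """
--     bins_items = [[] for _ in range(k)]
--     pq = [(0, i) for i in range(k)]  # ascending (weight, index)
--     for item, w in sorted(items_with_weights, key=lambda x: x[1], reverse=True):
--         bw, bi = pq.pop(0)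
--         bins_items[bi].append((item, w))
--         bw += w
--         j = 0
--         while j < len(pq) and pq[j] < (bw, bi):
--             j += 1
--         pq.insert(j, (bw, bi))
--     bins_w = [0] * k
--     for bw, bi in pq:
--         bins_w[bi] = bw
--     return bins_items, bins_w
-- ===== Notes on version B (the rewrite author's own statement) =====
-- stated objective: alternative
-- what changed: B replaces A's per-item argmin scan over all k bin weights (min(range(k), key=...)) by a priority queue kept as an ascending-sorted list of (weight, bin_index) pairs: pop the head (lightest bin, lowest index on ties) and re-insert it at its new sorted position, reconstructing bins_w from the queue at the end.
import Mathlib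
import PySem

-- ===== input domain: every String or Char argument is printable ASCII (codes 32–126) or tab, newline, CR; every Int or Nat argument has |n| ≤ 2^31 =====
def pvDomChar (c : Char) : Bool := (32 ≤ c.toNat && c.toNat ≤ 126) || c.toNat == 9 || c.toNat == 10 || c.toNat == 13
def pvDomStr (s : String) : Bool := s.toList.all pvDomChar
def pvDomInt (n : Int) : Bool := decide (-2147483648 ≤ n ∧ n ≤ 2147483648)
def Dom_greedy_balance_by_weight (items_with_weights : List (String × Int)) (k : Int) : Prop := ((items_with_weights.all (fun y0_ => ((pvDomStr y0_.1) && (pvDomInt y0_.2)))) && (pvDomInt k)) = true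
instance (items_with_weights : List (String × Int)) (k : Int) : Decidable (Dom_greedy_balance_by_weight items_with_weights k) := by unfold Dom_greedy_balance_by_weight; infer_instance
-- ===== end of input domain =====

-- B replaces A's per-item argmin scan over the k bin weights by a priority queue kept as an
-- ascending-sorted list of (weight, bin_index) pairs (pop head, re-insert at sorted position);
-- objective: alternative algorithm, same cost.

-- ===== PORT A =====
-- bins_items[bi].append(it)  (shared by both ports: Python `list[bi].append`)
def pvAppendAt (l : List (List (String × Int))) (i : Nat) (x : String × Int) : List (List (String × Int)) :=
  match l, i with
  | [], _ => []
  | b :: bs, 0 => (b ++ [x]) :: bs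
  | b :: bs, n + 1 => b :: pvAppendAt bs n x

-- min(range(kn), key=f) for kn ≥ 1: Python starts from the first element 0 and keeps the current
-- best on ties; folding from initial best 0 over the full range is identical (the first step
-- compares 0 with itself).  none = ValueError on an empty range.
def pvPyMinRange (kn : Nat) (f : Nat → Int) : Option Nat :=
  if kn = 0 then none
  else some ((List.range kn).foldl (fun b i => if f i < f b then i else b) 0)

def pvStepA (kn : Nat) (st : List (List (String × Int)) × List Int) (it : String × Int) :
    List (List (String × Int)) × List Int :=
  match pvPyMinRange kn (fun i => st.2.getD i 0) with
  | none => st   -- Python raises ValueError here (k ≤ 0 with a nonempty item list); excluded by Pre_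
  | some bi => (pvAppendAt st.1 bi it, st.2.set bi (st.2.getD bi 0 + it.2))

def greedy_balance_by_weight (items_with_weights : List (String × Int)) (k : Int) : (List (List (String × Int))) × List Int :=
  -- range(k) is empty for k < 0, so k.toNat is exact here
  (PySem.List.sorted items_with_weights (fun x => x.2) true).foldl (pvStepA k.toNat)
    (List.replicate k.toNat [], List.replicate k.toNat 0)

-- ===== PORT B =====
-- Python tuple comparison (w1, i1) < (w2, i2)
def pvPairLt (a b : Int × Nat) : Bool :=
  decide (a.1 < b.1) || (decide (a.1 = b.1) && decide (a.2 < b.2))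

-- pq.insert(j, p) at the first position j with not (pq[j] < p)
def pvInsertPQ (p : Int × Nat) : List (Int × Nat) → List (Int × Nat)
  | [] => [p]
  | q :: r => if pvPairLt q p then q :: pvInsertPQ p r else p :: q :: r

def pvStepB (st : List (List (String × Int)) × List (Int × Nat)) (it : String × Int) :
    List (List (String × Int)) × List (Int × Nat) :=
  match st.2 with
  | [] => st   -- Python raises IndexError on pq.pop(0); excluded by Pre_
  | (bw, bi) :: rest => (pvAppendAt st.1 bi it, pvInsertPQ (bw + it.2, bi) rest)

-- final reconstruction: bins_w = [0]*k; for bw, bi in pq: bins_w[bi] = bw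
def pvFinishB (kn : Nat) (st : List (List (String × Int)) × List (Int × Nat)) :
    List (List (String × Int)) × List Int :=
  (st.1, st.2.foldl (fun ws p => ws.set p.2 p.1) (List.replicate kn 0))

def greedy_balance_by_weight_alt (items_with_weights : List (String × Int)) (k : Int) : (List (List (String × Int))) × List Int :=
  pvFinishB k.toNat ((PySem.List.sorted items_with_weights (fun x => x.2) true).foldl pvStepB
    (List.replicate k.toNat [], (List.range k.toNat).map (fun i => ((0 : Int), i))))

-- ===== PRECONDITION & SPEC =====
-- Pre_ excludes exactly the inputs where Python A raises: a nonempty item list with k ≤ 0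
-- makes min(range(k), ...) raise ValueError.
def Pre_greedy_balance_by_weight (items_with_weights : List (String × Int)) (k : Int) : Prop :=
  items_with_weights = [] ∨ 1 ≤ k
instance (items_with_weights : List (String × Int)) (k : Int) : Decidable (Pre_greedy_balance_by_weight items_with_weights k) := by unfold Pre_greedy_balance_by_weight; infer_instance

def pvWitness_greedy_balance_by_weight : (List (String × Int)) × Int := ([("a", 2), ("b", 1), ("c", 2)], 2)

def Spec_greedy_balance_by_weight (items_with_weights : List (String × Int)) (k : Int) (out : (List (List (String × Int))) × List Int) : Prop := out = greedy_balance_by_weight_alt items_with_weights k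
instance (items_with_weights : List (String × Int)) (k : Int) (out : (List (List (String × Int))) × List Int) : Decidable (Spec_greedy_balance_by_weight items_with_weights k out) := by unfold Spec_greedy_balance_by_weight; infer_instance

-- ===== CLAIM (what is proved, stated in full; the proofs are below) =====
def Claim_equal_greedy_balance_by_weight : Prop := ∀ (items_with_weights : List (String × Int)) (k : Int), Dom_greedy_balance_by_weight items_with_weights k → Pre_greedy_balance_by_weight items_with_weights k → Spec_greedy_balance_by_weight items_with_weights k (greedy_balance_by_weight items_with_weights k)

-- ===== LEMMAS AND PROOFS =====

-- (weight, index) pairs of a weight list, indices starting at j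
def pvEnumFrom : Nat → List Int → List (Int × Nat)
  | _, [] => []
  | j, w :: r => (w, j) :: pvEnumFrom (j + 1) r

lemma pvPairLt_asymm {a b : Int × Nat} (h1 : pvPairLt a b = true) (h2 : pvPairLt b a = true) : False := by
  simp [pvPairLt] at h1 h2; omega

lemma pvPairLt_trans {a b c : Int × Nat} (h1 : pvPairLt a b = true) (h2 : pvPairLt b c = true) :
    pvPairLt a c = true := by
  simp [pvPairLt] at h1 h2 ⊢; omega

lemma pvPairLt_total_of_ne_snd {a b : Int × Nat} (h : a.2 ≠ b.2) :
    pvPairLt a b = true ∨ pvPairLt b a = true := by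
  simp [pvPairLt]; omega

lemma pvInsertPQ_perm (p : Int × Nat) (l : List (Int × Nat)) : (pvInsertPQ p l).Perm (p :: l) := by
  induction l with
  | nil => simp [pvInsertPQ]
  | cons q r ih =>
    simp only [pvInsertPQ]
    split
    · exact ((ih.cons q).trans (List.Perm.swap p q r))
    · exact List.Perm.refl _

lemma pvInsertPQ_pairwise (p : Int × Nat) (l : List (Int × Nat))
    (hl : l.Pairwise (fun a b => pvPairLt a b = true))
    (ht : ∀ q ∈ l, q.2 ≠ p.2) :
    (pvInsertPQ p l).Pairwise (fun a b => pvPairLt a b = true) := by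
  induction l with
  | nil => simp [pvInsertPQ]
  | cons q r ih =>
    rcases List.pairwise_cons.1 hl with ⟨hq, hr⟩
    simp only [pvInsertPQ]
    split
    · rename_i hqp
      refine List.pairwise_cons.2 ⟨?_, ih hr (fun x hx => ht x (List.mem_cons_of_mem q hx))⟩
      intro x hx
      have hx' := (pvInsertPQ_perm p r).mem_iff.1 hx
      rcases List.mem_cons.1 hx' with h | h
      · exact h ▸ hqp
      · exact hq x h
    · rename_i hqp
      have hpq : pvPairLt p q = true := by
        rcases pvPairLt_total_of_ne_snd (Ne.symm (ht q (List.mem_cons_self))) with h | h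
        · exact h
        · exact absurd h hqp
      refine List.pairwise_cons.2 ⟨?_, hl⟩
      intro x hx
      rcases List.mem_cons.1 hx with h | h
      · exact h ▸ hpq
      · exact pvPairLt_trans hpq (hq x h)

lemma pvEnumFrom_map_snd (ws : List Int) : ∀ j, (pvEnumFrom j ws).map Prod.snd = List.range' j ws.length := by
  induction ws with
  | nil => intro j; simp [pvEnumFrom]
  | cons w r ih => intro j; simp [pvEnumFrom, List.range'_succ, ih]

lemma pvMem_enumFrom {p : Int × Nat} (ws : List Int) : ∀ j, p ∈ pvEnumFrom j ws ↔
    ∃ t, t < ws.length ∧ p = (ws.getD t 0, j + t) := by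
  induction ws with
  | nil => intro j; simp [pvEnumFrom]
  | cons w r ih =>
    intro j
    simp only [pvEnumFrom, List.mem_cons, ih (j + 1)]
    constructor
    · rintro (rfl | ⟨t, ht, rfl⟩)
      · exact ⟨0, by simp⟩
      · exact ⟨t + 1, by simpa using ht, by simp [Nat.add_assoc, Nat.add_comm 1 t]⟩
    · rintro ⟨t, ht, rfl⟩
      cases t with
      | zero => left; simp
      | succ t => right; exact ⟨t, by simpa using ht, by simp [Nat.add_assoc, Nat.add_comm 1 t]⟩

lemma pvEnumFrom_replicate (n : Nat) : ∀ j, pvEnumFrom j (List.replicate n (0 : Int)) = (List.range' j n).map (fun i => ((0 : Int), i)) := by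
  induction n with
  | zero => intro j; simp [pvEnumFrom]
  | succ n ih => intro j; simp [pvEnumFrom, List.replicate_succ, List.range'_succ, ih]

lemma pvEnumFrom_length (ws : List Int) : ∀ j, (pvEnumFrom j ws).length = ws.length := by
  induction ws with
  | nil => intro j; simp [pvEnumFrom]
  | cons w r ih => intro j; simp [pvEnumFrom, ih]

-- head of a sorted permutation is the strict least element
lemma pvHead_eq_min {h : Int × Nat} {t l : List (Int × Nat)} {m : Int × Nat}
    (hs : (h :: t).Pairwise (fun a b => pvPairLt a b = true))
    (hp : (h :: t).Perm l) (hm : m ∈ l)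
    (hlt : ∀ q ∈ l, q ≠ m → pvPairLt m q = true) : h = m := by
  by_contra hne
  have hhl : h ∈ l := hp.mem_iff.1 (List.mem_cons_self)
  have h1 : pvPairLt m h = true := hlt h hhl hne
  have hmt : m ∈ t := by
    rcases List.mem_cons.1 (hp.mem_iff.2 hm) with h' | h'
    · exact absurd h'.symm hne
    · exact h'
  have h2 : pvPairLt h m = true := (List.pairwise_cons.1 hs).1 m hmt
  exact pvPairLt_asymm h1 h2

-- A's min(range(kn), key=f): first index attaining the minimum
lemma pvArgmin_spec (f : Nat → Int) (kn : Nat) (hk : 1 ≤ kn) :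
    ∃ b, pvPyMinRange kn f = some b ∧ b < kn ∧ (∀ i, i < b → f b < f i) ∧ (∀ i, i < kn → f b ≤ f i) := by
  have key : ∀ n, 1 ≤ n → (let b := (List.range n).foldl (fun b i => if f i < f b then i else b) 0;
      b < n ∧ (∀ i, i < b → f b < f i) ∧ (∀ i, i < n → f b ≤ f i)) := by
    intro n hn
    induction n with
    | zero => omega
    | succ n ih =>
      cases Nat.eq_or_lt_of_le hn with
      | inl h =>
        have : n = 0 := by omega
        subst this
        simp
      | inr h =>
        have hn1 : 1 ≤ n := by omega
        obtain ⟨hb, hlt, hle⟩ := ih hn1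
        simp only [List.range_succ, List.foldl_append, List.foldl_cons, List.foldl_nil]
        set b := (List.range n).foldl (fun b i => if f i < f b then i else b) 0 with hbdef
        by_cases hc : f n < f b
        · simp only [hc, if_pos]
          refine ⟨Nat.lt_succ_self n, ?_, ?_⟩
          · intro i hi; exact lt_of_lt_of_le hc (hle i hi)
          · intro i hi
            rcases Nat.lt_succ_iff_lt_or_eq.1 hi with h' | h'
            · exact le_of_lt (lt_of_lt_of_le hc (hle i h'))
            · exact h' ▸ le_refl _
        · simp only [hc, if_neg, not_false_iff]
          refine ⟨Nat.lt_succ_of_lt hb, hlt, ?_⟩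
          intro i hi
          rcases Nat.lt_succ_iff_lt_or_eq.1 hi with h' | h'
          · exact hle i h'
          · subst h'; omega
  obtain ⟨hb, hlt, hle⟩ := key kn hk
  refine ⟨_, ?_, hb, hlt, hle⟩
  unfold pvPyMinRange
  rw [if_neg (by omega)]

-- replacing one weight: permutation form without erase
lemma pvEnum_set_perm (ws : List Int) : ∀ (i j : Nat) (v : Int), i < ws.length →
    ((ws.getD i 0, j + i) :: pvEnumFrom j (ws.set i v)).Perm ((v, j + i) :: pvEnumFrom j ws) := by
  induction ws with
  | nil => intro i j v h; simp at h
  | cons w r ih =>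
    intro i j v h
    cases i with
    | zero =>
      simp only [List.getD_cons_zero, List.set_cons_zero, pvEnumFrom, Nat.add_zero]
      exact List.Perm.swap _ _ _
    | succ i =>
      have hi : i < r.length := by simpa using h
      have := ih i (j + 1) v hi
      simp only [List.getD_cons_succ, List.set_cons_succ, pvEnumFrom]
      have h1 : ((r.getD i 0, j + (i + 1)) :: (w, j) :: pvEnumFrom (j + 1) (r.set i v)).Perm
          ((w, j) :: (r.getD i 0, j + 1 + i) :: pvEnumFrom (j + 1) (r.set i v)) := by
        have : j + (i + 1) = j + 1 + i := by omega
        rw [this]; exact List.Perm.swap _ _ _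
      have h2 : ((w, j) :: (r.getD i 0, j + 1 + i) :: pvEnumFrom (j + 1) (r.set i v)).Perm
          ((w, j) :: (v, j + 1 + i) :: pvEnumFrom (j + 1) r) := (this).cons (w, j)
      have h3 : ((w, j) :: (v, j + 1 + i) :: pvEnumFrom (j + 1) r).Perm
          ((v, j + (i + 1)) :: (w, j) :: pvEnumFrom (j + 1) r) := by
        have : j + 1 + i = j + (i + 1) := by omega
        rw [this]; exact List.Perm.swap _ _ _
      exact (h1.trans h2).trans h3

-- writing each (weight, index) pair of a permutation of the enumeration reconstructs the list
lemma pvRecon (pq : List (Int × Nat)) : ∀ (base ws : List Int),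
    base.length = ws.length →
    (pq.map Prod.snd).Nodup →
    (∀ p ∈ pq, p.2 < ws.length ∧ ws.getD p.2 0 = p.1) →
    (∀ i, i < ws.length → i ∉ pq.map Prod.snd → base.getD i 0 = ws.getD i 0) →
    pq.foldl (fun a p => a.set p.2 p.1) base = ws := by
  induction pq with
  | nil =>
    intro base ws hlen _ _ hcov
    apply List.ext_getElem hlen
    intro i h1 h2
    have := hcov i h2 (by simp)
    rwa [List.getD_eq_getElem _ _ h1, List.getD_eq_getElem _ _ h2] at this
  | cons p rest ih =>
    intro base ws hlen hnd hmem hcov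
    simp only [List.foldl_cons]
    have hnd' := hnd
    simp only [List.map_cons, List.nodup_cons] at hnd'
    apply ih
    · simp [hlen]
    · exact hnd'.2
    · intro q hq; exact hmem q (List.mem_cons_of_mem p hq)
    · intro i hi hnin
      obtain ⟨hplt, hpval⟩ := hmem p (List.mem_cons_self)
      by_cases hip : i = p.2
      · subst hip
        rw [List.getD_eq_getElem _ _ (by simp only [List.length_set]; omega)]
        rw [List.getElem_set_self]
        exact hpval.symm
      · have : i ∉ (p :: rest).map Prod.snd := by
          simp only [List.map_cons, List.mem_cons, not_or]
          exact ⟨hip, fun h => hnin h⟩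
        have hbase := hcov i hi this
        rw [← hbase]
        rw [List.getD_eq_getElem _ _ (by simp only [List.length_set]; omega),
            List.getD_eq_getElem _ _ (by omega : i < base.length)]
        exact List.getElem_set_ne (fun h => hip h.symm) _

-- main loop invariant: bins agree, and B's queue is a sorted permutation of the enumeration of A's weights
lemma pvLoop_inv (kn : Nat) (hk : 1 ≤ kn) (items : List (String × Int)) :
    ∀ (bins : List (List (String × Int))) (ws : List Int) (pq : List (Int × Nat)),
    ws.length = kn →
    pq.Pairwise (fun a b => pvPairLt a b = true) →
    pq.Perm (pvEnumFrom 0 ws) →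
    (items.foldl (pvStepA kn) (bins, ws)).1 = (items.foldl pvStepB (bins, pq)).1 ∧
    (items.foldl (pvStepA kn) (bins, ws)).2.length = kn ∧
    (items.foldl pvStepB (bins, pq)).2.Pairwise (fun a b => pvPairLt a b = true) ∧
    (items.foldl pvStepB (bins, pq)).2.Perm (pvEnumFrom 0 (items.foldl (pvStepA kn) (bins, ws)).2) := by
  induction items with
  | nil =>
    intro bins ws pq hlen hs hp
    exact ⟨rfl, hlen, hs, hp⟩
  | cons it rest ih =>
    intro bins ws pq hlen hs hp
    obtain ⟨b, hbmin, hblt, hfirst, hmin⟩ := pvArgmin_spec (fun i => ws.getD i 0) kn hk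
    -- the least pair of the enumeration
    have hmpair : (ws.getD b 0, b) ∈ pvEnumFrom 0 ws := by
      rw [pvMem_enumFrom]
      exact ⟨b, by omega, by simp⟩
    have hleast : ∀ q ∈ pvEnumFrom 0 ws, q ≠ (ws.getD b 0, b) → pvPairLt (ws.getD b 0, b) q = true := by
      intro q hq hne
      rw [pvMem_enumFrom] at hq
      obtain ⟨t, ht, rfl⟩ := hq
      simp only [Nat.zero_add] at hne ⊢
      have htne : t ≠ b := fun h => hne (by rw [h])
      rcases Nat.lt_or_ge t b with h' | h'
      · -- t < b: strictly larger weight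
        have := hfirst t h'
        simp only [pvPairLt, Bool.or_eq_true, Bool.and_eq_true, decide_eq_true_eq]
        omega
      · have hbt : b < t := by omega
        have := hmin t (by omega)
        simp only [pvPairLt, Bool.or_eq_true, Bool.and_eq_true, decide_eq_true_eq]
        omega
    -- pq is nonempty and its head is the least pair
    have hpqlen : pq.length = ws.length := by
      rw [hp.length_eq, pvEnumFrom_length]
    cases pq with
    | nil =>
      exfalso
      simp only [List.length_nil] at hpqlen
      omega
    | cons hd tl =>
      have hhd : hd = (ws.getD b 0, b) := pvHead_eq_min hs hp hmpair hleast
      -- B's step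
      have hstepB : pvStepB (bins, (hd :: tl)) it =
          (pvAppendAt bins b it, pvInsertPQ (ws.getD b 0 + it.2, b) tl) := by
        rw [hhd]; rfl
      have hstepA : pvStepA kn (bins, ws) it =
          (pvAppendAt bins b it, ws.set b (ws.getD b 0 + it.2)) := by
        simp only [pvStepA, hbmin]
      -- new invariant pieces
      have hsnd : ((hd :: tl).map Prod.snd).Nodup := by
        have := hp.map Prod.snd
        rw [pvEnumFrom_map_snd] at this
        exact this.nodup_iff.2 List.nodup_range'
      have hbtl : ∀ q ∈ tl, q.2 ≠ b := by
        intro q hq hcon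
        have h1 : q.2 ∈ tl.map Prod.snd := List.mem_map_of_mem hq
        have h2 : hd.2 ∉ tl.map Prod.snd := (List.nodup_cons.1 hsnd).1
        rw [hhd] at h2
        exact h2 (hcon ▸ h1)
      have htlsort : tl.Pairwise (fun a b => pvPairLt a b = true) := (List.pairwise_cons.1 hs).2
      have hnewsort := pvInsertPQ_pairwise (ws.getD b 0 + it.2, b) tl htlsort hbtl
      -- permutation for the new state
      have htlperm : ((ws.getD b 0 + it.2, b) :: tl).Perm (pvEnumFrom 0 (ws.set b (ws.getD b 0 + it.2))) := by
        have h1 : ((ws.getD b 0, b) :: pvEnumFrom 0 (ws.set b (ws.getD b 0 + it.2))).Perm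
            ((ws.getD b 0 + it.2, b) :: pvEnumFrom 0 ws) := by
          have := pvEnum_set_perm ws b 0 (ws.getD b 0 + it.2) (by omega)
          simpa using this
        -- from hp : (hd::tl) ~ enum ws, hd = least pair
        have hp' := hp
        rw [hhd] at hp'
        have h2 : ((ws.getD b 0 + it.2, b) :: pvEnumFrom 0 ws).Perm
            ((ws.getD b 0 + it.2, b) :: (ws.getD b 0, b) :: tl) := List.Perm.cons _ hp'.symm
        have h3 : ((ws.getD b 0 + it.2, b) :: (ws.getD b 0, b) :: tl).Perm
            ((ws.getD b 0, b) :: (ws.getD b 0 + it.2, b) :: tl) := List.Perm.swap _ _ _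
        have h4 := h1.trans (h2.trans h3)
        -- h4 : ((ws.getD b 0, b) :: enum(set)) ~ ((ws.getD b 0, b) :: (new,b) :: tl)
        exact (List.Perm.cons_inv h4).symm
      have hinsperm : (pvInsertPQ (ws.getD b 0 + it.2, b) tl).Perm
          (pvEnumFrom 0 (ws.set b (ws.getD b 0 + it.2))) :=
        (pvInsertPQ_perm _ _).trans htlperm
      have := ih (pvAppendAt bins b it) (ws.set b (ws.getD b 0 + it.2))
        (pvInsertPQ (ws.getD b 0 + it.2, b) tl)
        (by simp only [List.length_set]; exact hlen) hnewsort hinsperm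
      simpa [List.foldl_cons, hstepA, hstepB] using this

-- initial queue facts
lemma pvInit_enum (kn : Nat) : (List.range kn).map (fun i => ((0 : Int), i)) = pvEnumFrom 0 (List.replicate kn (0 : Int)) := by
  rw [pvEnumFrom_replicate, List.range_eq_range']

lemma pvInit_sorted (kn : Nat) : ((List.range kn).map (fun i => ((0 : Int), i))).Pairwise (fun a b => pvPairLt a b = true) := by
  refine List.Pairwise.map (fun i => ((0 : Int), i))
    (fun a b hab => ?_) (List.pairwise_lt_range)
  simp [pvPairLt, hab]

-- reconstruction applied to a sorted-permutation queue
lemma pvRecon_of_perm (pq : List (Int × Nat)) (ws : List Int) (kn : Nat)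
    (hlen : ws.length = kn) (hperm : pq.Perm (pvEnumFrom 0 ws)) :
    pq.foldl (fun a p => a.set p.2 p.1) (List.replicate kn 0) = ws := by
  apply pvRecon
  · simp [hlen]
  · have := hperm.map Prod.snd
    rw [pvEnumFrom_map_snd] at this
    exact this.nodup_iff.2 List.nodup_range'
  · intro p hp
    have := hperm.mem_iff.1 hp
    rw [pvMem_enumFrom] at this
    obtain ⟨t, ht, rfl⟩ := this
    constructor
    · simpa using ht
    · simp
  · intro i hi hnin
    exfalso
    apply hnin
    have : i ∈ (pvEnumFrom 0 ws).map Prod.snd := by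
      rw [pvEnumFrom_map_snd]
      simp [List.mem_range'_1]; omega
    exact ((hperm.map Prod.snd).mem_iff).2 this

-- ===== VERDICT (by name: the statement is the Claim_ definition above) =====
theorem greedy_balance_by_weight_spec : Claim_equal_greedy_balance_by_weight := by
  intro items k _ hpre
  unfold Spec_greedy_balance_by_weight greedy_balance_by_weight greedy_balance_by_weight_alt pvFinishB
  rcases hpre with hemp | hk
  · -- items = []: no loop iterations; only the reconstruction matters
    subst hemp
    rw [show PySem.List.sorted ([] : List (String × Int)) (fun x => x.2) true = []
        from (PySem.List.sorted_eq_nil_iff _ _ _).2 rfl]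
    simp only [List.foldl_nil]
    refine Prod.ext rfl ?_
    rw [pvInit_enum]
    exact (pvRecon_of_perm _ _ _ (by simp) (List.Perm.refl _)).symm
  · have hkn : 1 ≤ k.toNat := by omega
    obtain ⟨h1, h2, _, h4⟩ := pvLoop_inv k.toNat hkn (PySem.List.sorted items (fun x => x.2) true)
      (List.replicate k.toNat []) (List.replicate k.toNat 0)
      ((List.range k.toNat).map (fun i => ((0 : Int), i)))
      (by simp) (pvInit_sorted k.toNat) (by rw [pvInit_enum])
    refine Prod.ext h1 ?_
    exact (pvRecon_of_perm _ _ _ h2 h4).symm
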